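-- pv_equiv track=rewrite | github.com/elijah-routh/PanAmBlog | scripts/generate-caribbean-svg.py | stable_id
-- ===== SOURCE A (Python) =====
-- def stable_id(props: dict) -> str:
--     iso2 = (props.get("ISO_A2") or "").strip()
--     if len(iso2) == 2 and iso2.isalpha() and iso2 != "-99":
--         return iso2.upper()
--     iso3 = (props.get("ISO_A3") or "").strip()
--     if iso3 and iso3 != "-99":
--         return iso3.upper()
--     name = (props.get("NAME") or props.get("ADMIN") or "UNKNOWN").strip()
--     out = []
--     last_us = False
--     for ch in name.upper():
--         ok = ("A" <= ch <= "Z") or ("0" <= ch <= "9")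
--         if ok:
--             out.append(ch)
--             last_us = False
--         elif not last_us:
--             out.append("_")
--             last_us = True
--     slug = "".join(out).strip("_")
--     return slug or "UNKNOWN"
-- ===== SOURCE B (Python) =====
-- def _ok(ch: str) -> bool:
--     return "A" <= ch <= "Z" or "0" <= ch <= "9"
--
--
-- def _field(props: dict, key: str) -> str:
--     return (props.get(key) or "").strip()
--
--
-- def stable_id(props: dict) -> str:
--     iso2 = _field(props, "ISO_A2")
--     if len(iso2) == 2 and iso2.isalpha() and iso2 != "-99":
--         return iso2.upper()
--     iso3 = _field(props, "ISO_A3")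
--     if iso3 and iso3 != "-99":
--         return iso3.upper()
--     name = (props.get("NAME") or props.get("ADMIN") or "UNKNOWN").strip().upper()
--     # Collect the maximal runs of allowed characters as tokens; joining them
--     # with "_" yields the slug directly (no underscore state machine, no strip).
--     tokens = []
--     rest = name
--     while rest:
--         if _ok(rest[0]):
--             k = 1
--             while k < len(rest) and _ok(rest[k]):
--                 k += 1
--             tokens.append(rest[:k])
--             rest = rest[k:]
--         else:
--             rest = rest[1:]
--     return "_".join(tokens) or "UNKNOWN"
-- ===== Notes on version B (the rewrite author's own statement) =====
-- stated objective: alternative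
-- what changed: A's out/last_us underscore state machine plus a final strip('_') is replaced by a tokenizer that extracts the maximal runs of allowed characters and joins them with '_', which never produces leading/trailing/doubled underscores in the first place.
import Mathlib
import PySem

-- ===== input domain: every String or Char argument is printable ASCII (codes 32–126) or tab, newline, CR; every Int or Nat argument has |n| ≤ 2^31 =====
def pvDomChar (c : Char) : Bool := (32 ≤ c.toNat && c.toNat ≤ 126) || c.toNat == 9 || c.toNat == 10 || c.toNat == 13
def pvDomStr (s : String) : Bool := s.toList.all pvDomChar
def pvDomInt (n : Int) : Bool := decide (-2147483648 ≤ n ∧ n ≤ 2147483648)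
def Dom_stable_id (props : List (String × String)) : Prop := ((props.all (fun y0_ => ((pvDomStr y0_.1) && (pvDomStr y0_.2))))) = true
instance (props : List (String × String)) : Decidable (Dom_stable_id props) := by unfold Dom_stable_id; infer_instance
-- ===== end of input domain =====

-- B replaces A's out/last_us underscore state machine by a tokenizer that
-- extracts the maximal runs of allowed characters and joins them with "_"
-- (no strip needed; objective: alternative, similar cost).

-- `x or d` for an optional string x (Python truthiness: None and "" are falsy)
def pvOrStr (a : Option String) (b : String) : String :=
  match a with
  | some s => if s = "" then b else s
  | none => b

-- the char test `("A" <= ch <= "Z") or ("0" <= ch <= "9")`, identical in Source A and Source B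
def pvOk (ch : Char) : Bool :=
  (decide ('A' ≤ ch) && decide (ch ≤ 'Z')) || (decide ('0' ≤ ch) && decide (ch ≤ '9'))

-- ===== PORT A =====
def stable_id (props : List (String × String)) : String :=
  let d : PySem.Dict String String := PySem.Dict.mk props
  let iso2 := PySem.Str.strip (pvOrStr (d.get? "ISO_A2") "")
  if PySem.Str.len iso2 = 2 ∧ PySem.Str.strIsalpha iso2 = true ∧ iso2 ≠ "-99" then
    PySem.Str.upper iso2
  else
    let iso3 := PySem.Str.strip (pvOrStr (d.get? "ISO_A3") "")
    if iso3 ≠ "" ∧ iso3 ≠ "-99" then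
      PySem.Str.upper iso3
    else
      let name := PySem.Str.strip (pvOrStr (d.get? "NAME") (pvOrStr (d.get? "ADMIN") "UNKNOWN"))
      -- out/last_us state machine over name.upper()
      let st := (PySem.Str.upper name).toList.foldl
        (fun (s : List Char × Bool) ch =>
          if pvOk ch then (s.1 ++ [ch], false)
          else if !s.2 then (s.1 ++ ['_'], true)
          else s) ([], false)
      let slug := PySem.Chars.stripChars st.1 ['_']
      if slug = [] then "UNKNOWN" else String.ofList slug

-- ===== PORT B =====
-- Source B's `_field(props, key)`: `(props.get(key) or "").strip()`
-- (`s or ""` is `s` for every string s and `""` for None, i.e. getD "")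
def pvField (props : List (String × String)) (key : String) : String :=
  PySem.Str.strip (((PySem.Dict.mk props).get? key).getD "")

-- Source B's tokenizer loop: peel the maximal run of allowed characters (rest[:k])
-- when the head is allowed, otherwise drop the head
def pvTok : List Char → List (List Char)
  | [] => []
  | c :: r =>
    if pvOk c then (c :: r.takeWhile pvOk) :: pvTok (r.dropWhile pvOk) else pvTok r
termination_by cs => cs.length
decreasing_by
  · exact Nat.lt_succ_of_le (List.length_dropWhile_le pvOk r)
  · exact Nat.lt_succ_self r.length

def stable_id_alt (props : List (String × String)) : String :=
  let iso2 := pvField props "ISO_A2"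
  if PySem.Str.len iso2 = 2 ∧ PySem.Str.strIsalpha iso2 = true ∧ iso2 ≠ "-99" then
    PySem.Str.upper iso2
  else
    let iso3 := pvField props "ISO_A3"
    if iso3 ≠ "" ∧ iso3 ≠ "-99" then
      PySem.Str.upper iso3
    else
      let d : PySem.Dict String String := PySem.Dict.mk props
      let name := PySem.Str.upper
        (PySem.Str.strip (pvOrStr (d.get? "NAME") (pvOrStr (d.get? "ADMIN") "UNKNOWN")))
      let tokens := pvTok name.toList
      let slug := PySem.Chars.join ['_'] tokens
      if slug = [] then "UNKNOWN" else String.ofList slug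

-- ===== PRECONDITION & SPEC =====
def Spec_stable_id (props : List (String × String)) (out : String) : Prop := out = stable_id_alt props
instance (props : List (String × String)) (out : String) : Decidable (Spec_stable_id props out) := by unfold Spec_stable_id; infer_instance

-- ===== CLAIM (what is proved, stated in full; the proofs are below) =====
def Claim_equal_stable_id : Prop := ∀ (props : List (String × String)), Dom_stable_id props → Spec_stable_id props (stable_id props)

-- ===== LEMMAS AND PROOFS =====

-- A's loop as a structural recursion on the remaining characters
def pvLoopA : List Char → Bool → List Char
  | [], _ => []
  | c :: r, last =>
    if pvOk c then c :: pvLoopA r false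
    else if last then pvLoopA r last
    else '_' :: pvLoopA r true

-- remove trailing underscores
def pvStripR (s : List Char) : List Char :=
  (List.dropWhile (fun c => (['_'] : List Char).contains c) s.reverse).reverse

lemma pvOk_toNat {c : Char} (h : pvOk c = true) :
    (65 ≤ c.toNat ∧ c.toNat ≤ 90) ∨ (48 ≤ c.toNat ∧ c.toNat ≤ 57) := by
  simp only [pvOk, Bool.or_eq_true, Bool.and_eq_true, decide_eq_true_eq, Char.le_def,
    UInt32.le_iff_toNat_le] at h
  exact h

lemma pvOk_ne_underscore {c : Char} (h : pvOk c = true) : c ≠ '_' := by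
  intro he; subst he
  rcases pvOk_toNat h with ⟨h1, h2⟩ | ⟨h1, h2⟩ <;> simp [Char.toNat] at h1 h2

lemma contains_underscore (c : Char) : ((['_'] : List Char).contains c) = (c == '_') := by
  rcases instDecidableEqChar c '_' with h | h
  · simp [List.contains_eq_mem, h]
  · simp [List.contains_eq_mem, h]

-- the foldl in port A computes pvLoopA
lemma foldl_eq_pvLoopA (cs : List Char) (out : List Char) (last : Bool) :
    (cs.foldl (fun (s : List Char × Bool) ch =>
        if pvOk ch then (s.1 ++ [ch], false)
        else if !s.2 then (s.1 ++ ['_'], true)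
        else s) (out, last)).1 = out ++ pvLoopA cs last := by
  induction cs generalizing out last with
  | nil => simp [pvLoopA]
  | cons c r ih =>
    rw [List.foldl_cons]
    show (List.foldl _ (if pvOk c then (out ++ [c], false)
        else if !last then (out ++ ['_'], true) else (out, last)) r).1 = _
    by_cases h : pvOk c = true
    · rw [if_pos h, ih, pvLoopA, if_pos h]; simp
    · rw [if_neg h]
      cases last with
      | true =>
        show (List.foldl _ (out, true) r).1 = _
        rw [ih, pvLoopA, if_neg h, if_pos rfl]
      | false =>
        show (List.foldl _ (out ++ ['_'], true) r).1 = _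
        rw [ih, pvLoopA, if_neg h]
        simp

-- pvLoopA started with last_us = true begins with an ok character (or is empty)
lemma pvLoopA_true_head (cs : List Char) :
    pvLoopA cs true = [] ∨ ∃ c x, pvLoopA cs true = c :: x ∧ pvOk c = true := by
  induction cs with
  | nil => left; rfl
  | cons c r ih =>
    by_cases h : pvOk c = true
    · right; exact ⟨c, pvLoopA r false, by simp [pvLoopA, h], h⟩
    · simpa [pvLoopA, h] using ih

lemma pvLoopA_true_nil_iff (cs : List Char) : pvLoopA cs true = [] ↔ pvTok cs = [] := by
  induction cs with
  | nil => simp [pvLoopA, pvTok]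
  | cons c r ih =>
    by_cases h : pvOk c = true
    · simp [pvLoopA, pvTok, h]
    · simp [pvLoopA, pvTok, h, ih]

lemma dropWhile_us_of_ok (w : List Char) (hw : ∀ c ∈ w, pvOk c = true) :
    List.dropWhile (fun c => (['_'] : List Char).contains c) w = w := by
  cases w with
  | nil => rfl
  | cons a t =>
    rw [List.dropWhile_cons,
      if_neg (by simp [pvOk_ne_underscore (hw a (by simp))])]

lemma pvStripR_of_ok (w : List Char) (hw : ∀ c ∈ w, pvOk c = true) : pvStripR w = w := by
  unfold pvStripR
  rw [dropWhile_us_of_ok _ (by intro c hc; exact hw c (List.mem_reverse.mp hc)), List.reverse_reverse]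

lemma head_dropWhile_false (p : Char → Bool) (l : List Char) (c : Char) (r' : List Char)
    (h : l.dropWhile p = c :: r') : p c = false := by
  induction l with
  | nil => simp at h
  | cons a t ih =>
    rw [List.dropWhile_cons] at h
    by_cases ha : p a = true
    · rw [if_pos ha] at h; exact ih h
    · rw [if_neg ha] at h
      cases h; simpa using ha

lemma pvLoopA_ok_prefix (w s : List Char) (hw : ∀ c ∈ w, pvOk c = true) :
    pvLoopA (w ++ s) false = w ++ pvLoopA s false := by
  induction w with
  | nil => rfl
  | cons a t ih =>
    rw [List.cons_append, pvLoopA, if_pos (hw a (by simp)), ih (fun c hc => hw c (by simp [hc]))]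
    rfl

lemma stripR_len (n : Nat) : ∀ cs : List Char, cs.length ≤ n →
    pvStripR (pvLoopA cs true) = PySem.Chars.join ['_'] (pvTok cs) := by
  induction n with
  | zero =>
    intro cs h
    rw [List.length_eq_zero_iff.mp (Nat.le_zero.mp h)]
    simp [pvLoopA, pvTok, pvStripR, PySem.Chars.join_nil]
  | succ n ih =>
    intro cs hlen
    cases cs with
    | nil => simp [pvLoopA, pvTok, pvStripR, PySem.Chars.join_nil]
    | cons c r =>
      by_cases h : pvOk c = true
      · -- token head
        have hr : r.takeWhile pvOk ++ r.dropWhile pvOk = r := List.takeWhile_append_dropWhile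
        have hwok : ∀ x ∈ c :: r.takeWhile pvOk, pvOk x = true := by
          intro x hx
          rcases List.mem_cons.mp hx with rfl | hx'
          · exact h
          · exact List.mem_takeWhile_imp hx'
        have h1 : pvLoopA (c :: r) true
            = (c :: r.takeWhile pvOk) ++ pvLoopA (r.dropWhile pvOk) false := by
          rw [pvLoopA, if_pos h]
          conv_lhs => rw [← hr]
          rw [pvLoopA_ok_prefix _ _ (fun x hx => List.mem_takeWhile_imp hx)]
          rfl
        have h2 : pvTok (c :: r) = (c :: r.takeWhile pvOk) :: pvTok (r.dropWhile pvOk) := by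
          rw [pvTok, if_pos h]
        cases hs : r.dropWhile pvOk with
        | nil =>
          rw [h1, h2, hs]
          simp only [pvLoopA, List.append_nil, pvTok, PySem.Chars.join_singleton]
          exact pvStripR_of_ok _ hwok
        | cons c' r' =>
          have hc' : pvOk c' = false := head_dropWhile_false _ _ _ _ hs
          have hlen' : r'.length ≤ n := by
            have := congrArg List.length hr
            rw [hs] at this
            simp only [List.length_append, List.length_cons] at this
            simp only [List.length_cons] at hlen
            omega
          have htok' : pvTok (c' :: r') = pvTok r' := by
            rw [pvTok, if_neg (by simp [hc'])]
          have hloop : pvLoopA (c' :: r') false = '_' :: pvLoopA r' true := by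
            rw [pvLoopA, if_neg (by simp [hc']), if_neg (by simp)]
          rw [h1, h2, hs, htok', hloop]
          rcases pvLoopA_true_head r' with hy | ⟨d, x, hy, hd⟩
          · -- rest is all separators: trailing underscore stripped, no more tokens
            rw [hy, (pvLoopA_true_nil_iff r').mp hy, PySem.Chars.join_singleton]
            unfold pvStripR
            have hrev : ((c :: List.takeWhile pvOk r) ++ '_' :: ([] : List Char)).reverse
                = '_' :: (c :: List.takeWhile pvOk r).reverse := by simp
            rw [hrev, List.dropWhile_cons, if_pos (by simp),
              dropWhile_us_of_ok _ (fun x hx => hwok x (List.mem_reverse.mp hx)),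
              List.reverse_reverse]
          · -- more tokens follow
            have hne : pvTok r' ≠ [] := by
              intro hnil
              rw [(pvLoopA_true_nil_iff r').mpr hnil] at hy
              simp at hy
            have ihr := ih r' hlen'
            have hstrip : pvStripR ((c :: r.takeWhile pvOk) ++ '_' :: pvLoopA r' true)
                = (c :: r.takeWhile pvOk) ++ '_' :: pvStripR (pvLoopA r' true) := by
              unfold pvStripR
              rw [List.reverse_append, List.reverse_cons]
              have hdw : List.dropWhile (fun c => (['_'] : List Char).contains c)
                  ((pvLoopA r' true).reverse ++ ['_'] ++ (c :: r.takeWhile pvOk).reverse)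
                  = List.dropWhile (fun c => (['_'] : List Char).contains c)
                      (pvLoopA r' true).reverse ++ ['_'] ++ (c :: r.takeWhile pvOk).reverse := by
                rw [List.append_assoc, List.dropWhile_append]
                have : ¬ (List.dropWhile (fun c => (['_'] : List Char).contains c)
                    (pvLoopA r' true).reverse).isEmpty = true := by
                  rw [List.isEmpty_iff, List.dropWhile_eq_nil_iff]
                  intro hall
                  have hdmem : d ∈ (pvLoopA r' true).reverse := by
                    rw [hy]; simp
                  have := hall d hdmem
                  rw [contains_underscore] at this
                  exact pvOk_ne_underscore hd (by simpa using this)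
                rw [if_neg this, List.append_assoc]
              rw [hdw]
              simp
            rw [hstrip, ihr]
            cases htk : pvTok r' with
            | nil => exact absurd htk hne
            | cons t ts =>
              rw [PySem.Chars.join_cons_cons]
              simp
      · -- separator head: structural
        have hlen' : r.length ≤ n := by simpa using Nat.le_of_succ_le_succ hlen
        have : pvLoopA (c :: r) true = pvLoopA r true := by
          rw [pvLoopA, if_neg (by simp [h]), if_pos rfl]
        rw [this, pvTok, if_neg (by simp [h])]
        exact ih r hlen'

lemma dropWhile_pvLoopA_true (s : List Char) :
    List.dropWhile (fun c => (['_'] : List Char).contains c) (pvLoopA s true) = pvLoopA s true := by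
  rcases pvLoopA_true_head s with hnil | ⟨d, x, hx, hd⟩
  · rw [hnil]; rfl
  · rw [hx, List.dropWhile_cons,
      if_neg (by simp [pvOk_ne_underscore hd])]

lemma stripChars_eq (s : List Char) :
    PySem.Chars.stripChars s ['_']
      = (List.dropWhile (fun c => (['_'] : List Char).contains c)
          (List.dropWhile (fun c => (['_'] : List Char).contains c) s).reverse).reverse := rfl

lemma strip_pvLoopA_false (cs : List Char) :
    PySem.Chars.stripChars (pvLoopA cs false) ['_'] = PySem.Chars.join ['_'] (pvTok cs) := by
  have hmain : ∀ s : List Char,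
      pvStripR (pvLoopA s true) = PySem.Chars.join ['_'] (pvTok s) :=
    fun s => stripR_len s.length s le_rfl
  rw [stripChars_eq]
  cases cs with
  | nil => simp [pvLoopA, pvTok, PySem.Chars.join_nil]
  | cons c r =>
    by_cases h : pvOk c = true
    · have heq : pvLoopA (c :: r) false = pvLoopA (c :: r) true := by
        rw [pvLoopA, pvLoopA, if_pos h, if_pos h]
      rw [heq, dropWhile_pvLoopA_true (c :: r)]
      exact hmain (c :: r)
    · have heq : pvLoopA (c :: r) false = '_' :: pvLoopA r true := by
        rw [pvLoopA, if_neg (by simp [h]), if_neg (by simp)]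
      have htok : pvTok (c :: r) = pvTok r := by rw [pvTok, if_neg (by simp [h])]
      rw [heq, List.dropWhile_cons, if_pos (by simp),
        dropWhile_pvLoopA_true r, htok]
      exact hmain r

-- the two slug computations agree
lemma slug_eq (cs : List Char) :
    PySem.Chars.stripChars (cs.foldl (fun (s : List Char × Bool) ch =>
        if pvOk ch then (s.1 ++ [ch], false)
        else if !s.2 then (s.1 ++ ['_'], true)
        else s) ([], false)).1 ['_'] =
    PySem.Chars.join ['_'] (pvTok cs) := by
  rw [foldl_eq_pvLoopA, List.nil_append, strip_pvLoopA_false]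

-- `x or ""` equals `x.getD ""` (Source B's _field vs A's inline `or ""`)
lemma pvOrStr_empty (a : Option String) : pvOrStr a "" = a.getD "" := by
  cases a with
  | none => rfl
  | some s =>
    by_cases h : s = "" <;> simp [pvOrStr, h]

-- ===== VERDICT (by name: the statement is the Claim_ definition above) =====
theorem stable_id_spec : Claim_equal_stable_id := by
  intro props _
  show stable_id props = stable_id_alt props
  unfold stable_id stable_id_alt pvField
  simp only [slug_eq, pvOrStr_empty]
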